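-- pv_equiv track=rewrite | github.com/nhdewitt/codewars-kata | Python/7 kyu/unscrambled_eggs.py | unscramble_eggs
-- ===== SOURCE A (Python) =====
-- def unscramble_eggs(word):
--     unscrambled = ""
--     i = 0
--     while i < len(word):
--         unscrambled += word[i]
--         if word[i].lower() in "aeiou" or word[i] == " ":
--             if i == len(word) - 1:
--                 break
--             i += 1
--         else:
--             i += 4
--     return unscrambled
-- ===== SOURCE B (Python) =====
-- def unscramble_eggs(word):
--     vowels = set("aeiouAEIOU ")
--     chunks = []
--     while word:
--         j = next((k for k, c in enumerate(word) if c not in vowels), None)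
--         if j is None:
--             chunks.append(word)
--             break
--         chunks.append(word[:j + 1])
--         word = word[j + 4:]
--     return "".join(chunks)
-- ===== Notes on version B (the rewrite author's own statement) =====
-- stated objective: alternative
-- what changed: Instead of A's per-character while loop with data-dependent index jumps and repeated string concatenation, B works chunk-wise: it repeatedly searches for the first consonant, copies the whole vowel-run prefix up to and including it as one slice, drops the 3 inserted letters, and joins the collected chunks once.
import Mathlib
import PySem

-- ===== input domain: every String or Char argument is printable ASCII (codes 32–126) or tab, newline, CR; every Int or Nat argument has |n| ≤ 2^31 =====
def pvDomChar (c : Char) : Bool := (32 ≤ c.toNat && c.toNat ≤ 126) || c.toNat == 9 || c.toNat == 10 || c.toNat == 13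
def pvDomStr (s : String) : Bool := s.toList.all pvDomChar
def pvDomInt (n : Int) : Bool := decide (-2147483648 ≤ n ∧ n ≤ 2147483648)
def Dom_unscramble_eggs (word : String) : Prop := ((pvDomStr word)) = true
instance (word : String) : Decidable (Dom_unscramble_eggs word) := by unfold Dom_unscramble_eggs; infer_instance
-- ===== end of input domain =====

-- B avoids A's per-character index jumps: it searches for the next consonant, copies the
-- vowel-run prefix as one chunk, drops the 3 inserted letters, and joins the chunks once.

-- ===== PORT A =====
-- A's test: word[i].lower() in "aeiou" or word[i] == " "
def pvVowelSpace (c : Char) : Bool := c.toLower ∈ ['a','e','i','o','u'] || c == ' '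

-- A's while loop: index i, accumulator string (as List Char), i += 1 or i += 4
def pvALoop (cs : List Char) (i : Nat) (acc : List Char) : List Char :=
  if h : i < cs.length then
    let acc' := acc ++ [cs[i]]
    if pvVowelSpace cs[i] then
      if i == cs.length - 1 then acc' else pvALoop cs (i + 1) acc'
    else pvALoop cs (i + 4) acc'
  else acc
termination_by cs.length - i

def unscramble_eggs (word : String) : String :=
  String.ofList (pvALoop word.toList 0 [])

-- ===== PORT B =====
-- B's test: c not in set("aeiouAEIOU ")
def pvIsCons (c : Char) : Bool := !(c ∈ ['a','e','i','o','u','A','E','I','O','U',' '])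

-- next((k for k, c in enumerate(word) if c not in vowels), None)
def pvConsIdx (cs : List Char) : Option Nat := cs.findIdx? pvIsCons

-- B's while loop: append word[:j+1] as one chunk, continue with word[j+4:]
def pvBChunks (cs : List Char) (acc : List Char) : List Char :=
  if cs = [] then acc
  else
    match pvConsIdx cs with
    | none => acc ++ cs
    | some j => pvBChunks (cs.drop (j + 4)) (acc ++ cs.take (j + 1))
termination_by cs.length
decreasing_by
  simp only [List.length_drop]
  have : cs.length > 0 := List.length_pos_of_ne_nil (by assumption)
  omega

def unscramble_eggs_alt (word : String) : String :=
  String.ofList (pvBChunks word.toList [])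

-- ===== PRECONDITION & SPEC =====
def Spec_unscramble_eggs (word : String) (out : String) : Prop := out = unscramble_eggs_alt word
instance (word : String) (out : String) : Decidable (Spec_unscramble_eggs word out) := by unfold Spec_unscramble_eggs; infer_instance

-- ===== CLAIM (what is proved, stated in full; the proofs are below) =====
def Claim_equal_unscramble_eggs : Prop := ∀ (word : String), Dom_unscramble_eggs word → Spec_unscramble_eggs word (unscramble_eggs word)

-- ===== LEMMAS AND PROOFS =====

-- A's vowel/space test is the negation of B's consonant test, for every Char
theorem pvPred_eq (c : Char) : pvVowelSpace c = !(pvIsCons c) := by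
  have ea : ('a':Char).val.toNat = 97 := rfl
  have ee : ('e':Char).val.toNat = 101 := rfl
  have ei : ('i':Char).val.toNat = 105 := rfl
  have eo : ('o':Char).val.toNat = 111 := rfl
  have eu : ('u':Char).val.toNat = 117 := rfl
  have eA : ('A':Char).val.toNat = 65 := rfl
  have eE : ('E':Char).val.toNat = 69 := rfl
  have eI : ('I':Char).val.toNat = 73 := rfl
  have eO : ('O':Char).val.toNat = 79 := rfl
  have eU : ('U':Char).val.toNat = 85 := rfl
  have eZ : ('Z':Char).val.toNat = 90 := rfl
  have esp : (' ':Char).val.toNat = 32 := rfl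
  have esub : (('a':Char).val - ('A':Char).val).toNat = 32 := rfl
  have key : (('A':Char).val ≤ c.val ∧ c.val ≤ ('Z':Char).val) ↔
      (65 ≤ c.val.toNat ∧ c.val.toNat ≤ 90) := by
    rw [UInt32.le_iff_toNat_le, UInt32.le_iff_toNat_le, eA, eZ]
  simp only [pvVowelSpace, pvIsCons, Char.toLower, Bool.not_not]
  split
  · rename_i h
    rw [ge_iff_le] at h
    have hn := key.mp h
    rw [Bool.eq_iff_iff]
    simp only [Bool.or_eq_true, decide_eq_true_eq, List.mem_cons, List.not_mem_nil, or_false,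
      beq_iff_eq, Char.ext_iff, UInt32.ext_iff, UInt32.toNat_add, esub,
      ea, ee, ei, eo, eu, eA, eE, eI, eO, eU, esp]
    omega
  · rename_i h
    rw [ge_iff_le] at h
    have hn : ¬ (65 ≤ c.val.toNat ∧ c.val.toNat ≤ 90) := fun hc => h (key.mpr hc)
    rw [Bool.eq_iff_iff]
    simp only [Bool.or_eq_true, decide_eq_true_eq, List.mem_cons, List.not_mem_nil, or_false,
      beq_iff_eq, Char.ext_iff, UInt32.ext_iff, ea, ee, ei, eo, eu, eA, eE, eI, eO, eU, esp]
    omega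

-- B on a chunk starting with a vowel/space: emit it and continue on the rest
theorem pvBChunks_vowel (c : Char) (rest acc : List Char) (hv : pvIsCons c = false) :
    pvBChunks (c :: rest) acc = pvBChunks rest (acc ++ [c]) := by
  rw [pvBChunks]
  simp only [reduceCtorEq, if_false]
  have hidx : pvConsIdx (c :: rest) = (pvConsIdx rest).map (· + 1) := by
    simp [pvConsIdx, List.findIdx?_cons, hv]
  rw [hidx]
  cases hr : pvConsIdx rest with
  | none =>
    simp only [Option.map_none]
    conv_rhs => rw [pvBChunks]
    rcases rest with _ | ⟨d, rest'⟩
    · simp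
    · simp [hr]
  | some j =>
    have hne : rest ≠ [] := by
      intro he; rw [he] at hr; simp [pvConsIdx] at hr
    conv_rhs => rw [pvBChunks]
    simp only [hne, if_false, hr, Option.map_some]
    have h1 : (c :: rest).drop (j + 1 + 4) = rest.drop (j + 4) := by
      simp [List.drop_succ_cons]
    have h2 : (c :: rest).take (j + 1 + 1) = c :: rest.take (j + 1) := by
      simp [List.take_succ_cons]
    rw [h1, h2]
    simp

-- B on a chunk starting with a consonant: emit it and drop the next 3
theorem pvBChunks_cons (c : Char) (rest acc : List Char) (hv : pvIsCons c = true) :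
    pvBChunks (c :: rest) acc = pvBChunks (rest.drop 3) (acc ++ [c]) := by
  rw [pvBChunks]
  have hidx : pvConsIdx (c :: rest) = some 0 := by
    simp [pvConsIdx, List.findIdx?_cons, hv]
  simp [hidx]

-- A's loop at index i equals B's chunk loop on the suffix from i
theorem pvLoop_agree (cs : List Char) (i : Nat) (acc : List Char) :
    pvALoop cs i acc = pvBChunks (cs.drop i) acc := by
  by_cases h : i < cs.length
  · rw [List.drop_eq_getElem_cons h, pvALoop]
    simp only [h, dif_pos]
    by_cases hv : pvVowelSpace cs[i]
    · have hc : pvIsCons cs[i] = false := by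
        have := pvPred_eq cs[i]; rw [hv] at this; simpa using this.symm
      rw [pvBChunks_vowel _ _ _ hc]
      simp only [hv, if_pos]
      by_cases hlast : i = cs.length - 1
      · subst hlast
        have hnil : cs.drop (cs.length - 1 + 1) = [] := List.drop_eq_nil_of_le (by omega)
        simp [hnil, pvBChunks]
      · have hne : (i == cs.length - 1) = false := by simp [hlast]
        rw [hne]
        simp only [Bool.false_eq_true, if_false]
        exact pvLoop_agree cs (i + 1) (acc ++ [cs[i]])
    · have hc : pvIsCons cs[i] = true := by
        have := pvPred_eq cs[i]
        cases hcc : pvIsCons cs[i] <;> simp_all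
      rw [pvBChunks_cons _ _ _ hc]
      simp only [hv, Bool.false_eq_true, if_false]
      rw [pvLoop_agree cs (i + 4) (acc ++ [cs[i]])]
      rw [List.drop_drop]
  · rw [pvALoop]
    have hnil : cs.drop i = [] := List.drop_eq_nil_of_le (by omega)
    simp [h, hnil, pvBChunks]
termination_by cs.length - i

-- ===== VERDICT (by name: the statement is the Claim_ definition above) =====
theorem unscramble_eggs_spec : Claim_equal_unscramble_eggs := by
  intro word _
  unfold Spec_unscramble_eggs unscramble_eggs unscramble_eggs_alt
  rw [pvLoop_agree]
  simp
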